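-- pv_equiv track=rewrite | github.com/purelyricky/gsam | eval/finance/finer_transfer.py | concept_specific_accuracy
-- ===== SOURCE A (Python) =====
-- from typing import Dict, List, Tuple, Any, Optional, Callable
--
-- def concept_specific_accuracy(
--     answer: str,
--     target: str,
--     concept: str,
-- ) -> Tuple[int, int]:
--     """
--     Compute accuracy only on the tag positions relevant to *concept*.
--
--     FiNER targets are comma-separated (e.g. "A,B,A,C"). If we are
--     testing transfer to concept A, only positions where the ground truth
--     is A should count.
--
--     Returns:
--         (correct_positions, total_positions)
--     """
--     pred_tags = [t.strip() for t in answer.split(",")]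
--     true_tags = [t.strip() for t in target.split(",")]
--
--     correct = 0
--     total = 0
--     for i, true_tag in enumerate(true_tags):
--         if true_tag == concept:
--             total += 1
--             if i < len(pred_tags) and pred_tags[i] == true_tag:
--                 correct += 1
--
--     return correct, total
-- ===== SOURCE B (Python) =====
-- def concept_specific_accuracy(answer, target, concept):
--     def go(preds, trues):
--         # recurse on the structure of the tag lists; no indices needed
--         if not trues:
--             return (0, 0)
--         c, n = go(preds[1:] if preds else [], trues[1:])
--         if trues[0] == concept:
--             n += 1
--             if preds and preds[0] == concept:
--                 c += 1
--         return (c, n)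
--
--     pred_tags = [t.strip() for t in answer.split(",")]
--     true_tags = [t.strip() for t in target.split(",")]
--     return go(pred_tags, true_tags)
-- ===== Notes on version B (the rewrite author's own statement) =====
-- stated objective: alternative
-- what changed: A's indexed enumerate loop with an accumulator and an in-bounds guard is replaced by a structural recursion that consumes both tag lists head-by-head and builds the pair back out of the recursive call, so no indices or length checks are involved.
import Mathlib
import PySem

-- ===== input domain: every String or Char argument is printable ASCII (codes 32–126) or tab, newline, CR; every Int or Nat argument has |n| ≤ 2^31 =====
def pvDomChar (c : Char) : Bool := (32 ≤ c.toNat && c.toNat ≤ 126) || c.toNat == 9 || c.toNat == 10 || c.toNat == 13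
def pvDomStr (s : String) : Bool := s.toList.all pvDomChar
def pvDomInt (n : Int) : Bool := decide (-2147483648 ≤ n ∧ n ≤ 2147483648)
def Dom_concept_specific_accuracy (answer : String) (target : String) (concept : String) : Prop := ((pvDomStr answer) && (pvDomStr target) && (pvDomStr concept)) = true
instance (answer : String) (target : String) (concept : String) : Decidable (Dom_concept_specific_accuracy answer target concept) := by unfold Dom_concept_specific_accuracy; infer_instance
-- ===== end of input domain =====

-- B replaces A's indexed accumulator loop by a structural recursion consuming both tag
-- lists head-by-head (no indices, no length guard). Objective: alternative decomposition.

-- ===== PORT A =====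
-- the body of A's 'for i, true_tag in enumerate(true_tags)' loop
def pvLoopA (pred_tags : List String) (concept : String)
    (acc : Int × Int) (p : Int × String) : Int × Int :=
  if p.2 == concept then
    (if decide (p.1 < (pred_tags.length : Int)) && (PySem.List.pyGetD pred_tags p.1 "" == p.2)
       then acc.1 + 1 else acc.1,
     acc.2 + 1)
  else acc

def concept_specific_accuracy (answer : String) (target : String) (concept : String) : Int × Int :=
  let pred_tags := ((PySem.Str.split? answer ",").getD []).map PySem.Str.strip
  let true_tags := ((PySem.Str.split? target ",").getD []).map PySem.Str.strip
  (PySem.List.enumerate true_tags 0).foldl (pvLoopA pred_tags concept) (0, 0)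

-- ===== PORT B =====
-- B's recursive helper 'go(preds, trues)': recursion on trues, heads compared directly
def pvGo (concept : String) : List String → List String → Int × Int
  | _, [] => (0, 0)
  | [], t :: ts =>
    let cn := pvGo concept [] ts
    if t == concept then (cn.1, cn.2 + 1) else cn
  | p :: ps, t :: ts =>
    let cn := pvGo concept ps ts
    if t == concept then
      (if p == concept then (cn.1 + 1, cn.2 + 1) else (cn.1, cn.2 + 1))
    else cn

def concept_specific_accuracy_alt (answer : String) (target : String) (concept : String) : Int × Int :=
  let pred_tags := ((PySem.Str.split? answer ",").getD []).map PySem.Str.strip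
  let true_tags := ((PySem.Str.split? target ",").getD []).map PySem.Str.strip
  pvGo concept pred_tags true_tags

-- ===== PRECONDITION & SPEC =====
def Spec_concept_specific_accuracy (answer : String) (target : String) (concept : String) (out : Int × Int) : Prop := out = concept_specific_accuracy_alt answer target concept
instance (answer : String) (target : String) (concept : String) (out : Int × Int) : Decidable (Spec_concept_specific_accuracy answer target concept out) := by unfold Spec_concept_specific_accuracy; infer_instance

-- ===== CLAIM (what is proved, stated in full; the proofs are below) =====
def Claim_equal_concept_specific_accuracy : Prop := ∀ (answer : String) (target : String) (concept : String), Dom_concept_specific_accuracy answer target concept → Spec_concept_specific_accuracy answer target concept (concept_specific_accuracy answer target concept)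

-- ===== LEMMAS AND PROOFS =====
-- A's loop computes (countP of the zipped pair lists, count of concept in trues)
theorem pvLoop_eq (ps : List String) (concept : String) :
    ∀ (ts : List String) (s : Nat) (c t : Int),
      (PySem.List.enumerate ts (s : Int)).foldl (pvLoopA ps concept) (c, t) =
        (c + (((ps.drop s).zip ts).countP (fun pt => pt.2 == concept && pt.1 == concept) : Int),
         t + (ts.count concept : Int)) := by
  intro ts
  induction ts with
  | nil => intro s c t; simp [PySem.List.enumerate_nil]
  | cons x ts ih =>
    intro s c t
    have hcast : (s : Int) + 1 = ((s + 1 : Nat) : Int) := by push_cast; ring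
    rw [PySem.List.enumerate_cons, List.foldl_cons, hcast]
    by_cases hx : x = concept
    · subst hx
      by_cases hs : s < ps.length
      · have hdrop : ps.drop s = ps[s] :: ps.drop (s + 1) := List.drop_eq_getElem_cons hs
        have hsi : ((s : Int) < (ps.length : Int)) := by exact_mod_cast hs
        have hget : PySem.List.pyGetD ps (s : Int) "" = ps[s] := by
          simp [PySem.List.pyGetD_natCast, List.getD_eq_getElem?_getD, List.getElem?_eq_getElem hs]
        by_cases hp : ps[s] = x
        · have hstep : pvLoopA ps x (c, t) ((s : Int), x) = (c + 1, t + 1) := by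
            simp [pvLoopA, hsi, hget, hp]
          rw [hstep, ih]
          simp [hdrop, hp]
          omega
        · have hstep : pvLoopA ps x (c, t) ((s : Int), x) = (c, t + 1) := by
            simp [pvLoopA, hget, hp]
          rw [hstep, ih]
          have hb : (ps[s] == x) = false := by simp [hp]
          have hc : ((ps.drop s).zip (x :: ts)).countP (fun pt => pt.2 == x && pt.1 == x)
              = ((ps.drop (s + 1)).zip ts).countP (fun pt => pt.2 == x && pt.1 == x) := by
            rw [hdrop, List.zip_cons_cons, List.countP_cons]
            simp [hb]
          rw [hc]
          simp
          omega
      · have hdrop : ps.drop s = [] := List.drop_eq_nil_of_le (by omega)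
        have hdrop1 : ps.drop (s + 1) = [] := List.drop_eq_nil_of_le (by omega)
        have hguard : ¬ ((s : Int) < (ps.length : Int)) := by exact_mod_cast hs
        have hstep : pvLoopA ps x (c, t) ((s : Int), x) = (c, t + 1) := by
          simp [pvLoopA, hguard]
        rw [hstep, ih]
        simp [hdrop, hdrop1]
        omega
    · have hstep : pvLoopA ps concept (c, t) ((s : Int), x) = (c, t) := by
        simp [pvLoopA, hx]
      have hzip : ((ps.drop s).zip (x :: ts)).countP (fun pt => pt.2 == concept && pt.1 == concept)
           = ((ps.drop (s + 1)).zip ts).countP (fun pt => pt.2 == concept && pt.1 == concept) := by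
        rcases hd : ps.drop s with _ | ⟨y, l⟩
        · have : ps.drop (s + 1) = [] := by
            have := List.drop_eq_nil_iff.mp hd
            exact List.drop_eq_nil_of_le (by omega)
          simp [this]
        · have : ps.drop (s + 1) = l := by
            have h1 : ps.drop (s + 1) = (ps.drop s).drop 1 := by rw [List.drop_drop, Nat.add_comm]
            rw [h1, hd]; simp
          simp [this, hx]
      rw [hstep, ih]
      simp [hzip, hx]

-- B's recursion computes the same pair
theorem pvGo_eq (concept : String) :
    ∀ (ts ps : List String),
      pvGo concept ps ts =
        (((ps.zip ts).countP (fun pt => pt.2 == concept && pt.1 == concept) : Int),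
         (ts.count concept : Int)) := by
  intro ts
  induction ts with
  | nil => intro ps; simp [pvGo]
  | cons x ts ih =>
    intro ps
    rcases ps with _ | ⟨p, ps⟩
    · by_cases hx : x = concept <;> simp [pvGo, ih, hx, List.count_cons]
    · by_cases hx : x = concept
      · subst hx
        by_cases hp : p = x <;>
          simp [pvGo, ih, hp, List.zip_cons_cons]
      · simp [pvGo, ih, hx, List.zip_cons_cons]

-- ===== VERDICT (by name: the statement is the Claim_ definition above) =====
theorem concept_specific_accuracy_spec : Claim_equal_concept_specific_accuracy := by
  intro answer target concept _
  unfold Spec_concept_specific_accuracy concept_specific_accuracy concept_specific_accuracy_alt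
  have h := pvLoop_eq (((PySem.Str.split? answer ",").getD []).map PySem.Str.strip) concept
      (((PySem.Str.split? target ",").getD []).map PySem.Str.strip) 0 0 0
  have h2 := pvGo_eq concept (((PySem.Str.split? target ",").getD []).map PySem.Str.strip)
      (((PySem.Str.split? answer ",").getD []).map PySem.Str.strip)
  simp at h
  rw [h2]
  simpa using h
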